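-- pv_equiv track=rewrite | github.com/networkx/networkx | networkx/algorithms/isomorphism/tree_isomorphism.py | build_isomorphism
-- ===== SOURCE A (Python) =====
-- def build_isomorphism(root_T1, root_T2, children_T1, children_T2):
--     """Return an isomorphism between two rooted trees.
--
--     Given two isomorph rooted trees. Build an isomorphism between the vertices
--     of T1 and T2.
--
--     Parameters
--     ----------
--     root_T1 : node
--         The root of the rooted tree T1.
--
--     root_T2 : node
--         The root of the rooted tree T2.
--
--     children_T1 : dict of node: set of nodes
--         A mapping CHILDREN such that CHILDREN(v) is the ordered list of children
--         of v in the rooted tree T1.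
--
--     children_T2 : dict of node: set of nodes
--         A mapping CHILDREN such that CHILDREN(v) is the ordered list of children
--         of v in the rooted tree T_2.
--
--     Returns
--     -------
--     isomorphism : dict of node: node
--         An isomorphism map of the vertices T1 to the vertices of T2.
--
--     Note
--     ----
--     This algorithm runs in O(n) time and space.
--
--     """
--     # Empty isomorphism
--     isomorphism = {}
--
--     # Perform a DFS traversal to define the isomorphism.
--     Q = [(root_T1, root_T2)]
--
--     while len(Q) > 0:
--         # Get the head of the stack.
--         (v_T1, v_T2) = Q.pop()
--
--         isomorphism[v_T1] = v_T2
--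
--         if v_T1 in children_T1:
--             for i in range(len(children_T1[v_T1])):
--                 u_T1 = children_T1[v_T1][i]
--                 u_T2 = children_T2[v_T2][i]
--
--                 Q.append((u_T1, u_T2))
--
--     return isomorphism
-- ===== SOURCE B (Python) =====
-- def build_isomorphism(root_T1, root_T2, children_T1, children_T2):
--     """Recursive re-implementation: instead of a worklist stack mutating a dict,
--     a recursive helper returns the list of matched pairs of its subtree in the
--     exact order A's LIFO stack pops them (children right-to-left), and the
--     mapping is built once at the end with dict(pairs)."""
--
--     def visit(v_T1, v_T2):
--         out = [(v_T1, v_T2)]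
--         if v_T1 in children_T1:
--             l1 = children_T1[v_T1]
--             for i in range(len(l1) - 1, -1, -1):
--                 out += visit(l1[i], children_T2[v_T2][i])
--         return out
--
--     return dict(visit(root_T1, root_T2))
-- ===== Notes on version B (the rewrite author's own statement) =====
-- stated objective: alternative
-- what changed: The explicit worklist stack mutating a dict is replaced by a recursive helper that returns the list of matched pairs of each subtree in the original's pop order (children right-to-left), with the dict built once at the end via dict(pairs); same O(n) cost.
import Mathlib
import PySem

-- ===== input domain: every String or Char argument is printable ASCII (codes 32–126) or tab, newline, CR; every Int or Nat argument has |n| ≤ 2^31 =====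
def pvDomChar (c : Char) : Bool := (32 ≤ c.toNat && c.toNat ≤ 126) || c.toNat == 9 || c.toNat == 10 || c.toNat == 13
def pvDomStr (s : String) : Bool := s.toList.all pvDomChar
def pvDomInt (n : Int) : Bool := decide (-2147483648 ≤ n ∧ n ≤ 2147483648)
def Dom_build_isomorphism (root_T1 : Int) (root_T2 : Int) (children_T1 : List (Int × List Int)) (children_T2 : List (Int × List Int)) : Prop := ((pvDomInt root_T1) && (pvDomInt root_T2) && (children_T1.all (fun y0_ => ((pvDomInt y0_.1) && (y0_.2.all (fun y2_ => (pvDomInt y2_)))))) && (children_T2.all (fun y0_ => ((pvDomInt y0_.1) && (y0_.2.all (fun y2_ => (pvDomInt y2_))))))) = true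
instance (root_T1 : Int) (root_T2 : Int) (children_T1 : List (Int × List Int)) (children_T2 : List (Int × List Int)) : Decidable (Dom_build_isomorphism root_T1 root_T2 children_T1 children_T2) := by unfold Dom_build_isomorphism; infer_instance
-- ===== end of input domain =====

-- B replaces A's worklist stack mutating a dict by a recursive helper that RETURNS the
-- list of matched pairs in A's pop order (children right-to-left) and builds the dict
-- once at the end with dict(pairs); same O(n) cost (objective: alternative).


-- ===== PORT A =====
-- total number of child occurrences listed in a children dict (used only for A's fuel)
def pvTotal (c : List (Int × List Int)) : Nat := (c.map (fun p => p.2.length)).sum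

-- the while-loop of A: fuel-totalized (the fuel chosen in build_isomorphism provably
-- dominates the number of loop iterations on every input admitted by Pre_; on the other
-- inputs the Python loops forever or raises, which Pre_ excludes).
def pvGoA (children_T1 children_T2 : List (Int × List Int)) : Nat → List (Int × Int) → PySem.Dict Int Int → PySem.Dict Int Int
  | _, [], iso => iso
  | 0, _ :: _, iso => iso
  | fuel+1, (v_T1, v_T2) :: Q, iso =>
      let iso' := iso.insert v_T1 v_T2
      match (PySem.Dict.mk children_T1).get? v_T1 with
      | none => pvGoA children_T1 children_T2 fuel Q iso'
      | some cs1 =>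
        -- children_T2[v_T2]: Python raises KeyError when v_T2 is absent and cs1 ≠ [] — excluded by Pre_
        let cs2 := ((PySem.Dict.mk children_T2).get? v_T2).getD []
        -- for i in range(len(cs1)): Q.append((cs1[i], cs2[i]))
        -- (cs2[i] raises IndexError when cs2 is shorter — excluded by Pre_)
        pvGoA children_T1 children_T2 fuel
          ((List.range cs1.length).foldl (fun q i => (cs1.getD i 0, cs2.getD i 0) :: q) Q) iso'

def build_isomorphism (root_T1 : Int) (root_T2 : Int) (children_T1 : List (Int × List Int)) (children_T2 : List (Int × List Int)) : List (Int × Int) :=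
  (pvGoA children_T1 children_T2 ((pvTotal children_T1 + 1) ^ (children_T1.length + 2))
    [(root_T1, root_T2)] PySem.Dict.empty).items

-- ===== PORT B =====
-- the recursive visit of Source B: returns the pair LIST of the subtree rooted at (v1, v2),
-- fuel-totalized (fuel = number of dict entries + 2 dominates the recursion depth on
-- every input admitted by Pre_: a deeper chain would repeat a T1 key, i.e. a cycle).
def pvVisitB (children_T1 children_T2 : List (Int × List Int)) : Nat → Int → Int → List (Int × Int)
  | 0, _, _ => []
  | d+1, v_T1, v_T2 =>
      match (PySem.Dict.mk children_T1).get? v_T1 with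
      | none => [(v_T1, v_T2)]
      | some l1 =>
        -- for i in range(len(l1)-1, -1, -1): out += visit(l1[i], children_T2[v_T2][i])
        -- (the indices of l1 in descending order)
        ((List.range l1.length).reverse).foldl
          (fun out i => out ++ pvVisitB children_T1 children_T2 d (l1.getD i 0)
              ((((PySem.Dict.mk children_T2).get? v_T2).getD []).getD i 0))
          [(v_T1, v_T2)]

def build_isomorphism_alt (root_T1 : Int) (root_T2 : Int) (children_T1 : List (Int × List Int)) (children_T2 : List (Int × List Int)) : List (Int × Int) :=
  -- dict(pairs): successive insertion into an empty dict
  ((pvVisitB children_T1 children_T2 (children_T1.length + 2) root_T1 root_T2).foldl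
      (fun d p => d.insert p.1 p.2) PySem.Dict.empty).items

-- ===== PRECONDITION & SPEC =====
-- Pre_ holds exactly on the inputs where A returns normally: it excludes nothing on which
-- A returns a value.  pvOk is a depth-bounded well-formedness predicate on the PAIR of
-- children dicts (it computes no output and shares no code with either port): whenever a
-- T1 vertex with a nonempty child list is paired with a T2 vertex, that T2 vertex must be
-- a key of children_T2 with a child list at least as long, recursively, within depth
-- |children_T1| + 1 (a deeper chain repeats a T1 key, i.e. a cycle).  Whether the walk
-- over the two dicts terminates cannot be phrased without recursion over them; any
-- non-recursive approximation would exclude inputs on which A returns.  Outside Pre_ the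
-- Python A raises KeyError/IndexError or loops forever on a cycle, and B does the same.
def pvOk (children_T1 children_T2 : List (Int × List Int)) : Nat → Int → Int → Bool
  | 0, _, _ => false
  | d+1, v_T1, v_T2 =>
      match (PySem.Dict.mk children_T1).get? v_T1 with
      | none => true
      | some l1 =>
        l1.length == 0 ||
        match (PySem.Dict.mk children_T2).get? v_T2 with
        | none => false
        | some l2 =>
          decide (l1.length ≤ l2.length) &&
          (List.range l1.length).all (fun i => pvOk children_T1 children_T2 d (l1.getD i 0) (l2.getD i 0))

def Pre_build_isomorphism (root_T1 : Int) (root_T2 : Int) (children_T1 : List (Int × List Int)) (children_T2 : List (Int × List Int)) : Prop :=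
  pvOk children_T1 children_T2 (children_T1.length + 2) root_T1 root_T2 = true
instance (root_T1 : Int) (root_T2 : Int) (children_T1 : List (Int × List Int)) (children_T2 : List (Int × List Int)) : Decidable (Pre_build_isomorphism root_T1 root_T2 children_T1 children_T2) := by unfold Pre_build_isomorphism; infer_instance

def pvWitness_build_isomorphism : Int × Int × (List (Int × List Int)) × (List (Int × List Int)) :=
  (1, 10, [(1, [2, 3]), (2, []), (3, [])], [(10, [20, 30]), (20, []), (30, [])])

def Spec_build_isomorphism (root_T1 : Int) (root_T2 : Int) (children_T1 : List (Int × List Int)) (children_T2 : List (Int × List Int)) (out : List (Int × Int)) : Prop := out = build_isomorphism_alt root_T1 root_T2 children_T1 children_T2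
instance (root_T1 : Int) (root_T2 : Int) (children_T1 : List (Int × List Int)) (children_T2 : List (Int × List Int)) (out : List (Int × Int)) : Decidable (Spec_build_isomorphism root_T1 root_T2 children_T1 children_T2 out) := by unfold Spec_build_isomorphism; infer_instance

-- ===== CLAIM (what is proved, stated in full; the proofs are below) =====
def Claim_equal_build_isomorphism : Prop := ∀ (root_T1 : Int) (root_T2 : Int) (children_T1 : List (Int × List Int)) (children_T2 : List (Int × List Int)), Dom_build_isomorphism root_T1 root_T2 children_T1 children_T2 → Pre_build_isomorphism root_T1 root_T2 children_T1 children_T2 → Spec_build_isomorphism root_T1 root_T2 children_T1 children_T2 (build_isomorphism root_T1 root_T2 children_T1 children_T2)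

-- ===== LEMMAS AND PROOFS =====

-- the cost of visiting v: number of stack pops A spends on v's subtree (depth-truncated)
def pvCost (c1 : List (Int × List Int)) : Nat → Int → Nat
  | 0, _ => 0
  | d+1, v =>
    match (PySem.Dict.mk c1).get? v with
    | none => 1
    | some cs1 => 1 + ((List.range cs1.length).map (fun i => pvCost c1 d (cs1.getD i 0))).sum

lemma pvGoA_nil (c1 c2 : List (Int × List Int)) (f : Nat) (iso : PySem.Dict Int Int) :
    pvGoA c1 c2 f [] iso = iso := by
  cases f <;> rfl

lemma pvFoldlPush {α β : Type} (g : α → β) :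
    ∀ (xs : List α) (Q : List β), xs.foldl (fun q i => g i :: q) Q = (xs.map g).reverse ++ Q := by
  intro xs
  induction xs with
  | nil => intro Q; rfl
  | cons x xs ih => intro Q; rw [List.foldl_cons, ih]; simp

-- folding insertions over a foldl-append accumulation = folding the pieces one by one
lemma pvFoldFold {α β σ : Type} (h : β → List α) (ins : σ → α → σ) :
    ∀ (js : List β) (init : List α) (s : σ),
      (js.foldl (fun out i => out ++ h i) init).foldl ins s
        = js.foldl (fun acc i => (h i).foldl ins acc) (init.foldl ins s) := by
  intro js
  induction js with
  | nil => intro init s; rfl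
  | cons j js ih =>
      intro init s
      rw [List.foldl_cons, ih, List.foldl_append, List.foldl_cons]

lemma pvEntryLen (c1 : List (Int × List Int)) (v : Int) (cs : List Int)
    (h : (PySem.Dict.mk c1).get? v = some cs) : cs.length ≤ pvTotal c1 := by
  induction c1 with
  | nil => simp [PySem.Dict.get?] at h
  | cons p t ih =>
      obtain ⟨k, l⟩ := p
      rw [PySem.Dict.get?_mk_cons] at h
      by_cases hk : (k == v) = true
      · rw [if_pos hk] at h
        injection h with h'
        subst h'
        simp [pvTotal]
      · rw [if_neg hk] at h
        have := ih h
        simp only [pvTotal, List.map_cons, List.sum_cons] at *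
        omega

lemma pvCost_le (c1 : List (Int × List Int)) :
    ∀ (d : Nat) (v : Int), pvCost c1 d v ≤ (pvTotal c1 + 1) ^ d := by
  intro d
  induction d with
  | zero => intro v; simp [pvCost]
  | succ d ih =>
      intro v
      cases h1 : (PySem.Dict.mk c1).get? v with
      | none =>
          simp only [pvCost, h1]
          exact Nat.one_le_pow _ _ (by omega)
      | some cs1 =>
          simp only [pvCost, h1]
          have hsum : ((List.range cs1.length).map (fun i => pvCost c1 d (cs1.getD i 0))).sum
              ≤ cs1.length * (pvTotal c1 + 1) ^ d := by
            calc ((List.range cs1.length).map (fun i => pvCost c1 d (cs1.getD i 0))).sum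
                ≤ ((List.range cs1.length).map (fun i => pvCost c1 d (cs1.getD i 0))).length
                    • ((pvTotal c1 + 1) ^ d) := by
                  apply List.sum_le_card_nsmul
                  intro x hx
                  obtain ⟨i, _, rfl⟩ := List.mem_map.mp hx
                  exact ih _
              _ = cs1.length * (pvTotal c1 + 1) ^ d := by simp [smul_eq_mul]
          have hk : cs1.length ≤ pvTotal c1 := pvEntryLen c1 v cs1 h1
          have hpow : 1 ≤ (pvTotal c1 + 1) ^ d := Nat.one_le_pow _ _ (by omega)
          calc 1 + ((List.range cs1.length).map (fun i => pvCost c1 d (cs1.getD i 0))).sum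
              ≤ 1 + pvTotal c1 * (pvTotal c1 + 1) ^ d := by
                have := Nat.mul_le_mul_right ((pvTotal c1 + 1) ^ d) hk
                omega
            _ ≤ (pvTotal c1 + 1) ^ d + pvTotal c1 * (pvTotal c1 + 1) ^ d := by omega
            _ = (pvTotal c1 + 1) ^ (d + 1) := by ring

-- A's stack machine on (v1, v2), run for exactly the cost of that subtree, performs the
-- same insertions as folding B's pair list into the dict
lemma pvMain (c1 c2 : List (Int × List Int)) :
    ∀ (d : Nat) (v1 v2 : Int) (Q : List (Int × Int)) (iso : PySem.Dict Int Int) (f : Nat),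
      pvOk c1 c2 d v1 v2 = true →
      pvGoA c1 c2 (pvCost c1 d v1 + f) ((v1, v2) :: Q) iso
        = pvGoA c1 c2 f Q ((pvVisitB c1 c2 d v1 v2).foldl (fun x p => x.insert p.1 p.2) iso) := by
  intro d
  induction d with
  | zero => intro v1 v2 Q iso f hok; simp [pvOk] at hok
  | succ d ih =>
      intro v1 v2 Q iso f hok
      cases h1 : (PySem.Dict.mk c1).get? v1 with
      | none =>
          have hc : pvCost c1 (d+1) v1 = 1 := by simp [pvCost, h1]
          rw [hc, Nat.add_comm 1 f]
          simp [pvGoA, pvVisitB, h1]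
      | some l1 =>
          set g : Nat → Int × Int :=
            fun i => (l1.getD i 0, (((PySem.Dict.mk c2).get? v2).getD []).getD i 0) with hg
          set js : List Nat := (List.range l1.length).reverse with hjs
          have hmem : ∀ i ∈ js, pvOk c1 c2 d (g i).1 (g i).2 = true := by
            intro i hi
            rw [hjs, List.mem_reverse, List.mem_range] at hi
            have hnil : l1 ≠ [] := by intro h; subst h; exact absurd hi (by simp)
            have hne : (l1.length == 0) = false := by simp [hnil]
            have h0 := hok
            simp only [pvOk, h1, hne, Bool.false_or] at h0
            cases h2 : (PySem.Dict.mk c2).get? v2 with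
            | none => rw [h2] at h0; simp at h0
            | some l2 =>
                rw [h2] at h0
                simp at h0
                simpa [hg, h2] using h0.2 i hi
          -- one unfolding of A's loop
          have hc : pvCost c1 (d+1) v1 = 1 + (js.map (fun i => pvCost c1 d (g i).1)).sum := by
            simp only [pvCost, h1, hjs, hg, List.map_reverse, List.sum_reverse]
          have hstep : pvGoA c1 c2 (pvCost c1 (d+1) v1 + f) ((v1, v2) :: Q) iso
              = pvGoA c1 c2 ((js.map (fun i => pvCost c1 d (g i).1)).sum + f)
                  (js.map g ++ Q) (iso.insert v1 v2) := by
            rw [hc, Nat.add_assoc, Nat.add_comm 1 _]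
            simp only [pvGoA, h1]
            rw [pvFoldlPush g (List.range l1.length) Q, hjs]
            simp only [List.map_reverse, List.sum_reverse]
          -- one unfolding of B's visit, then the dict fold distributed over the pieces
          have hvis : (pvVisitB c1 c2 (d+1) v1 v2).foldl (fun x p => x.insert p.1 p.2) iso
              = js.foldl (fun acc i =>
                  (pvVisitB c1 c2 d (g i).1 (g i).2).foldl (fun x p => x.insert p.1 p.2) acc)
                  (iso.insert v1 v2) := by
            conv_lhs => rw [pvVisitB]
            rw [h1]
            rw [pvFoldFold (fun i => pvVisitB c1 c2 d (g i).1 (g i).2)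
                  (fun x p => x.insert p.1 p.2) js [(v1, v2)] iso]
            rfl
          rw [hstep, hvis]
          -- the inner loop over the pushed indices
          generalize iso.insert v1 v2 = iso0
          clear hstep hvis hc hok h1 hjs
          clear_value js
          revert hmem
          induction js generalizing Q iso0 with
          | nil => intro _; simp
          | cons j js ihp =>
              intro hmem
              have hj := hmem j (List.mem_cons_self ..)
              rw [List.map_cons, List.sum_cons, Nat.add_assoc, List.map_cons, List.cons_append,
                ih (g j).1 (g j).2 (js.map g ++ Q) iso0 _ hj, List.foldl_cons]
              exact ihp Q _ (fun i hi => hmem i (List.mem_cons_of_mem _ hi))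

-- ===== VERDICT (by name: the statement is the Claim_ definition above) =====
theorem build_isomorphism_spec : Claim_equal_build_isomorphism := by
  intro root_T1 root_T2 children_T1 children_T2 _ hPre
  unfold Spec_build_isomorphism build_isomorphism build_isomorphism_alt
  have hc : pvCost children_T1 (children_T1.length + 2) root_T1
      ≤ (pvTotal children_T1 + 1) ^ (children_T1.length + 2) := pvCost_le _ _ _
  rw [← Nat.add_sub_cancel' hc,
    pvMain children_T1 children_T2 (children_T1.length + 2) root_T1 root_T2 [] PySem.Dict.empty _ hPre,
    pvGoA_nil]
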